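-- pv_equiv track=rewrite | github.com/RescueDiver/arcs4 | reasoning/object_projection_rule_engine.py | project_patch_to_canvas
-- ===== SOURCE A (Python) =====
-- def make_blank_grid(h, w, fill=0):
--     return [[fill for _ in range(w)] for _ in range(h)]
--
-- def get_anchor_start(container_size, content_size, align_name):
--     if content_size > container_size:
--         return None
--
--     if align_name in ("top", "left"):
--         return 0
--
--     if align_name in ("middle", "center"):
--         return (container_size - content_size) // 2
--
--     if align_name in ("bottom", "right"):
--         return container_size - content_size
--
--     return 0
--
-- def project_patch_to_canvas(patch, out_h, out_w, v_align, h_align):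
--     ph = len(patch)
--     pw = len(patch[0]) if ph else 0
--
--     if ph == 0 or pw == 0:
--         return None
--
--     start_r = get_anchor_start(out_h, ph, v_align)
--     start_c = get_anchor_start(out_w, pw, h_align)
--
--     if start_r is None or start_c is None:
--         return None
--
--     canvas = make_blank_grid(out_h, out_w, fill=0)
--
--     for r in range(ph):
--         for c in range(pw):
--             val = patch[r][c]
--             if val != 0:
--                 canvas[start_r + r][start_c + c] = val
--
--     return canvas
-- ===== SOURCE B (Python) =====
-- def _anchor(container, content, align):
--     if content > container:
--         return None
--     if align in ("middle", "center"):
--         return (container - content) // 2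
--     if align in ("bottom", "right"):
--         return container - content
--     return 0
--
-- def project_patch_to_canvas(patch, out_h, out_w, v_align, h_align):
--     ph = len(patch)
--     pw = len(patch[0]) if ph else 0
--     if ph == 0 or pw == 0:
--         return None
--     start_r = _anchor(out_h, ph, v_align)
--     start_c = _anchor(out_w, pw, h_align)
--     if start_r is None or start_c is None:
--         return None
--     return [
--         [0] * start_c
--         + [patch[i - start_r][c] for c in range(pw)]
--         + [0] * (out_w - start_c - pw)
--         if start_r <= i < start_r + ph
--         else [0] * out_w
--         for i in range(out_h)
--     ]
-- ===== Notes on version B (the rewrite author's own statement) =====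
-- stated objective: simpler
-- what changed: B builds each output row directly by concatenation (left zero padding + per-cell copy of the patch row + right zero padding) in a single comprehension, instead of allocating a blank grid and then overwriting nonzero cells one by one via nested index assignments.
import Mathlib
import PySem

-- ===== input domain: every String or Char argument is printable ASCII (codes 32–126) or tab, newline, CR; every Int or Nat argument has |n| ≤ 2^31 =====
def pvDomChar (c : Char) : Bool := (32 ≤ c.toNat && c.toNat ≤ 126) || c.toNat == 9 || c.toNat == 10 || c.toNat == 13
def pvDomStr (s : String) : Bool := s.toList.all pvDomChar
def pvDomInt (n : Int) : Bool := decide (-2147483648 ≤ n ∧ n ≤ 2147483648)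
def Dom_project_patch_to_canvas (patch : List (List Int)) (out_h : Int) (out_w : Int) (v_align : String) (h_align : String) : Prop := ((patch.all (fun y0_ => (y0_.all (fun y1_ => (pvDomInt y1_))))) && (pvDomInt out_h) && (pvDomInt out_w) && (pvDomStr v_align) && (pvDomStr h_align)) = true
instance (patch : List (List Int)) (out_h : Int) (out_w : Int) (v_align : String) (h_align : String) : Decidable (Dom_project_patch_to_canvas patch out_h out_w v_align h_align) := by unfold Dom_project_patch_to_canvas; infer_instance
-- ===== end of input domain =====

-- B replaces A's blank-grid allocation plus nonzero-only cell-by-cell overwrite with a direct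
-- per-row construction (pad left, copy the patch row, pad right), for a simpler decomposition.

-- ===== PORT A =====
def make_blank_grid (h : Int) (w : Int) (fill : Int) : List (List Int) :=
  (PySem.List.pyRange 0 h 1).map (fun _ => (PySem.List.pyRange 0 w 1).map (fun _ => fill))

def get_anchor_start (container_size : Int) (content_size : Int) (align_name : String) : Option Int :=
  if content_size > container_size then none
  else if align_name = "top" ∨ align_name = "left" then some 0
  else if align_name = "middle" ∨ align_name = "center" then
    some (PySem.Int.floordiv (container_size - content_size) 2)
  else if align_name = "bottom" ∨ align_name = "right" then
    some (container_size - content_size)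
  else some 0

-- canvas[i][j] = v ; exact whenever 0 ≤ i < len(g) and 0 ≤ j < len(g[i]), which Pre_ guarantees
-- at every assignment A performs.
def pvSetCell (g : List (List Int)) (i : Int) (j : Int) (v : Int) : List (List Int) :=
  g.set i.toNat ((g.getD i.toNat []).set j.toNat v)

def project_patch_to_canvas (patch : List (List Int)) (out_h : Int) (out_w : Int) (v_align : String) (h_align : String) : Option (List (List Int)) :=
  let ph : Int := (patch.length : Int)
  let pw : Int := if patch.length ≠ 0 then (((PySem.List.pyGet? patch 0).getD []).length : Int) else 0
  if ph = 0 ∨ pw = 0 then none else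
  match get_anchor_start out_h ph v_align, get_anchor_start out_w pw h_align with
  | some start_r, some start_c =>
      let canvas := make_blank_grid out_h out_w 0
      some ((PySem.List.pyRange 0 ph 1).foldl (fun cv r =>
        (PySem.List.pyRange 0 pw 1).foldl (fun cv c =>
          let val := (PySem.List.pyGet? ((PySem.List.pyGet? patch r).getD []) c).getD 0
          if val ≠ 0 then pvSetCell cv (start_r + r) (start_c + c) val else cv) cv) canvas)
  | _, _ => none

-- ===== PORT B =====
def pvAnchor (container : Int) (content : Int) (align : String) : Option Int :=
  if content > container then none
  else if align = "middle" ∨ align = "center" then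
    some (PySem.Int.floordiv (container - content) 2)
  else if align = "bottom" ∨ align = "right" then
    some (container - content)
  else some 0

def project_patch_to_canvas_alt (patch : List (List Int)) (out_h : Int) (out_w : Int) (v_align : String) (h_align : String) : Option (List (List Int)) :=
  let ph : Int := (patch.length : Int)
  let pw : Int := if patch.length ≠ 0 then (((PySem.List.pyGet? patch 0).getD []).length : Int) else 0
  if ph = 0 ∨ pw = 0 then none else
  match pvAnchor out_h ph v_align, pvAnchor out_w pw h_align with
  | none, _ => none
  | _, none => none
  | some start_r, some start_c =>
      some ((PySem.List.pyRange 0 out_h 1).map (fun i =>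
        if start_r ≤ i ∧ i < start_r + ph then
          List.replicate start_c.toNat 0
            ++ (PySem.List.pyRange 0 pw 1).map (fun c =>
                 (PySem.List.pyGet? ((PySem.List.pyGet? patch (i - start_r)).getD []) c).getD 0)
            ++ List.replicate (out_w - start_c - pw).toNat 0
        else List.replicate out_w.toNat 0))

-- ===== PRECONDITION & SPEC =====
-- Pre_ excludes exactly the inputs on which A raises IndexError: a ragged patch whose later row is
-- shorter than the first row, reached while copying (i.e. when the patch actually fits the canvas).
def Pre_project_patch_to_canvas (patch : List (List Int)) (out_h : Int) (out_w : Int) (v_align : String) (h_align : String) : Prop :=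
  patch = [] ∨ (patch.headD []).length = 0
    ∨ ((patch.length : Int) > out_h) ∨ (((patch.headD []).length : Int) > out_w)
    ∨ ∀ row ∈ patch, (patch.headD []).length ≤ row.length
instance (patch : List (List Int)) (out_h : Int) (out_w : Int) (v_align : String) (h_align : String) : Decidable (Pre_project_patch_to_canvas patch out_h out_w v_align h_align) := by unfold Pre_project_patch_to_canvas; infer_instance

def pvWitness_project_patch_to_canvas : List (List Int) × Int × Int × String × String :=
  ([[1, 2], [3, 0]], 4, 5, "middle", "right")

def Spec_project_patch_to_canvas (patch : List (List Int)) (out_h : Int) (out_w : Int) (v_align : String) (h_align : String) (out : Option (List (List Int))) : Prop := out = project_patch_to_canvas_alt patch out_h out_w v_align h_align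
instance (patch : List (List Int)) (out_h : Int) (out_w : Int) (v_align : String) (h_align : String) (out : Option (List (List Int))) : Decidable (Spec_project_patch_to_canvas patch out_h out_w v_align h_align out) := by unfold Spec_project_patch_to_canvas; infer_instance

-- ===== CLAIM (what is proved, stated in full; the proofs are below) =====
def Claim_equal_project_patch_to_canvas : Prop := ∀ (patch : List (List Int)) (out_h : Int) (out_w : Int) (v_align : String) (h_align : String), Dom_project_patch_to_canvas patch out_h out_w v_align h_align → Pre_project_patch_to_canvas patch out_h out_w v_align h_align → Spec_project_patch_to_canvas patch out_h out_w v_align h_align (project_patch_to_canvas patch out_h out_w v_align h_align)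

-- ===== LEMMAS AND PROOFS =====

-- The two anchor helpers agree everywhere.
lemma anchor_eq (c s : Int) (a : String) : get_anchor_start c s a = pvAnchor c s a := by
  unfold get_anchor_start pvAnchor
  split_ifs with h1 h2 h3 h4 h5 h6 <;> try rfl
  all_goals (rcases h2 with h2 | h2 <;> subst h2 <;> simp_all)

-- Bounds an anchor result satisfies.
lemma anchor_bounds {c s t : Int} {a : String} (h : pvAnchor c s a = some t) :
    s ≤ c ∧ 0 ≤ t ∧ t + s ≤ c := by
  unfold pvAnchor at h
  split_ifs at h with h1 h2 h3 <;> injection h with h <;> subst h <;>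
    (try rw [PySem.Int.floordiv_eq_ediv_of_pos (by norm_num : (0:Int) < 2)]) <;> omega


-- focus: a fold that conditionally rewrites cells of one fixed row I acts on that row alone
lemma foldl_cell_focus {β : Type} (L : List β) (I : Nat) (v : β → Int) (J : β → Nat) :
    ∀ (cv : List (List Int)), I < cv.length →
    L.foldl (fun cv c => if v c ≠ 0 then cv.set I ((cv.getD I []).set (J c) (v c)) else cv) cv
      = cv.set I (L.foldl (fun rw c => if v c ≠ 0 then rw.set (J c) (v c) else rw) (cv.getD I [])) := by
  induction L with
  | nil =>
      intro cv hI
      simp only [List.foldl_nil]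
      rw [List.getD_eq_getElem _ _ (by simpa using hI), List.set_getElem_self hI]
  | cons c L ih =>
      intro cv hI
      simp only [List.foldl_cons]
      by_cases hv : v c ≠ 0
      · rw [if_pos hv, if_pos hv, ih _ (by simpa using hI), List.set_set]
        congr 1
        rw [List.getD_eq_getElem _ _ (by simpa using hI)]
        simp
      · rw [if_neg hv, if_neg hv, ih _ hI]

-- the conditional nonzero-overwrite of a blank row IS the padded copy of the patch row
lemma row_fold_eq (row : List Int) (C W pw : Nat) (hC : C + pw ≤ W) :
    ∀ m, m ≤ pw →
    (List.range m).foldl (fun rw c => if row.getD c 0 ≠ 0 then rw.set (C + c) (row.getD c 0) else rw)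
        (List.replicate W (0:Int))
      = List.replicate C 0 ++ (List.range m).map (fun c => row.getD c 0)
          ++ List.replicate (W - C - m) 0 := by
  intro m hm
  induction m with
  | zero =>
      simp only [List.range_zero, List.foldl_nil, List.map_nil, List.append_nil]
      rw [show W = C + (W - C) by omega, List.replicate_add]
      simp
  | succ m ih =>
      rw [List.range_succ, List.foldl_append, ih (by omega)]
      simp only [List.foldl_cons, List.foldl_nil, List.map_append, List.map_cons, List.map_nil]
      have htail : List.replicate (W - C - m) (0:Int)
          = 0 :: List.replicate (W - C - (m+1)) 0 := by
        rw [show W - C - m = (W - C - (m+1)) + 1 by omega, List.replicate_succ]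
      rw [htail]
      by_cases h0 : row.getD m 0 ≠ 0
      · rw [if_pos h0]
        simp [List.append_assoc]
      · rw [if_neg h0]
        have h0' : row.getD m 0 = 0 := by omega
        rw [h0']
        simp [List.append_assoc]

lemma set_map_range {α : Type} (n i : Nat) (f : Nat → α) (v : α) :
    ((List.range n).map f).set i v = (List.range n).map (fun k => if k = i then v else f k) := by
  apply List.ext_getElem (by simp)
  intro j h1 h2
  simp only [List.getElem_set, List.getElem_map, List.getElem_range]
  by_cases h : i = j
  · simp [h]
  · rw [if_neg h, if_neg (by omega)]

lemma outer_fold_eq (patch : List (List Int)) (H W R C pw : Nat)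
    (hH : R + patch.length ≤ H) (hC : C + pw ≤ W) :
    ∀ m, m ≤ patch.length →
    (List.range m).foldl (fun cv r =>
        (List.range pw).foldl (fun cv c =>
            if (patch.getD r []).getD c 0 ≠ 0 then
              cv.set (R + r) ((cv.getD (R + r) []).set (C + c) ((patch.getD r []).getD c 0))
            else cv) cv)
      ((List.range H).map (fun _ => List.replicate W (0:Int)))
    = (List.range H).map (fun k =>
        if R ≤ k ∧ k < R + m then
          List.replicate C 0 ++ (List.range pw).map (fun c => (patch.getD (k - R) []).getD c 0)
            ++ List.replicate (W - C - pw) 0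
        else List.replicate W 0) := by
  intro m hm
  induction m with
  | zero =>
      simp only [List.range_zero, List.foldl_nil]
      apply List.map_congr_left
      intro k _
      rw [if_neg (by omega)]
  | succ m ih =>
      rw [List.range_succ, List.foldl_append, ih (by omega)]
      simp only [List.foldl_cons, List.foldl_nil]
      have hRm : R + m < H := by omega
      rw [foldl_cell_focus (List.range pw) (R + m)
            (fun c => (patch.getD m []).getD c 0) (fun c => C + c) _ (by simp [hRm])]
      have hgetD : (((List.range H).map (fun k =>
          if R ≤ k ∧ k < R + m then
            List.replicate C 0 ++ (List.range pw).map (fun c => (patch.getD (k - R) []).getD c 0)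
              ++ List.replicate (W - C - pw) 0
          else List.replicate W 0)).getD (R + m) []) = List.replicate W (0:Int) := by
        rw [List.getD_eq_getElem _ _ (by simp [hRm])]
        simp only [List.getElem_map, List.getElem_range]
        rw [if_neg (by omega)]
      rw [hgetD,
        row_fold_eq (patch.getD m []) C W pw hC pw le_rfl,
        set_map_range]
      apply List.map_congr_left
      intro k hk
      by_cases hkm : k = R + m
      · subst hkm
        rw [if_pos rfl, if_pos (by omega), show R + m - R = m by omega]
      · rw [if_neg hkm]
        by_cases hcond : R ≤ k ∧ k < R + m
        · rw [if_pos hcond, if_pos (by omega)]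
        · rw [if_neg hcond, if_neg (by omega)]

lemma blank_eq (h w : Int) : make_blank_grid h w 0
    = (List.range h.toNat).map (fun _ => List.replicate w.toNat (0:Int)) := by
  unfold make_blank_grid
  rw [PySem.List.pyRange_one, PySem.List.pyRange_one]
  simp [Function.comp_def, List.map_const']

theorem project_patch_to_canvas_spec : Claim_equal_project_patch_to_canvas := by
  intro patch out_h out_w v_align h_align _hdom _hpre
  simp only [Spec_project_patch_to_canvas, project_patch_to_canvas, project_patch_to_canvas_alt,
    anchor_eq]
  cases patch with
  | nil => simp
  | cons r0 rest =>
    simp only [List.length_cons, ne_eq, Nat.succ_ne_zero, not_false_eq_true, if_true,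
      PySem.List.pyGet?_zero_cons, Option.getD_some]
    split_ifs with hguard
    · rfl
    · cases hA : pvAnchor out_h (↑(rest.length + 1)) v_align with
      | none => rfl
      | some sr =>
      cases hB : pvAnchor out_w (↑r0.length) h_align with
      | none => rfl
      | some sc =>
      obtain ⟨hfitv, hsr0, hsrtop⟩ := anchor_bounds hA
      obtain ⟨hfith, hsc0, hsctop⟩ := anchor_bounds hB
      rw [blank_eq, PySem.List.pyRange_one 0 (↑(rest.length + 1)),
        PySem.List.pyRange_one 0 (↑r0.length), PySem.List.pyRange_one 0 out_h]
      simp only [sub_zero, Int.toNat_natCast, List.foldl_map, List.map_map, zero_add,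
        Function.comp_def]
      have hpg : ∀ (xs : List (List Int)) (k : Nat),
          (PySem.List.pyGet? xs (k : Int)).getD [] = xs.getD k [] := fun xs k => by
        simp [List.getD_eq_getElem?_getD]
      have hpg0 : ∀ (xs : List Int) (k : Nat),
          (PySem.List.pyGet? xs (k : Int)).getD 0 = xs.getD k 0 := fun xs k => by
        simp [List.getD_eq_getElem?_getD]
      have hsrT : ∀ k : Nat, (sr + (k : Int)).toNat = sr.toNat + k := fun k => by omega
      have hscT : ∀ k : Nat, (sc + (k : Int)).toNat = sc.toNat + k := fun k => by omega
      simp only [pvSetCell, hsrT, hscT, hpg, hpg0]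
      rw [outer_fold_eq (r0 :: rest) out_h.toNat out_w.toNat sr.toNat sc.toNat r0.length
        (by simp only [List.length_cons]; omega) (by omega) (rest.length + 1)
        (by simp only [List.length_cons]; exact le_rfl)]
      congr 1
      apply List.map_congr_left
      intro k hk
      rw [List.mem_range] at hk
      by_cases hcond : sr.toNat ≤ k ∧ k < sr.toNat + (rest.length + 1)
      · rw [if_pos hcond, if_pos (by constructor <;> [omega; omega] : sr ≤ (k:Int) ∧ (k:Int) < sr + ↑(rest.length + 1))]
        rw [show ((k : Int) - sr) = ((k - sr.toNat : Nat) : Int) by omega,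
          show (out_w - sc - ↑r0.length).toNat = out_w.toNat - sc.toNat - r0.length by omega]
        simp only [hpg]
      · rw [if_neg hcond, if_neg (by omega : ¬(sr ≤ (k:Int) ∧ (k:Int) < sr + ↑(rest.length + 1)))]
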